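-- pv_equiv track=rewrite | github.com/bellegarde-c/mpdbrowser | src/mpdBrowserUtils.py | cutStringAtSize
-- ===== SOURCE A (Python) =====
-- def cutStringAtSize (string, size, totalSize):
--     """
--         Format string for an iconview
--         Replace ' ' by '\n' every size char
--         Terminate string with ... if len > totalSize
--     """
--     if len (string) > totalSize:
--         string = string[:totalSize] + "..."
--
--     newString = ""
--     lastSpace = -1
--     i = 0
--     sub = 0
--     while i < len (string):
--         if sub > size and string[i] == " ":
--             newString += '\n'
--             sub = 0
--         else:
--             newString += string[i]
--         sub += 1
--         i += 1
--     return newString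
-- ===== SOURCE B (Python) =====
-- def cutStringAtSize(string, size, totalSize):
--     if len(string) > totalSize:
--         string = string[:totalSize] + "..."
--     parts = string.split(' ')
--     out = [parts[0]]
--     c = len(parts[0])
--     for part in parts[1:]:
--         if c > size:
--             out.append('\n')
--             c = 1
--         else:
--             out.append(' ')
--             c += 1
--         out.append(part)
--         c += len(part)
--     return ''.join(out)
-- ===== Notes on version B (the rewrite author's own statement) =====
-- stated objective: faster
-- what changed: Replaced the per-character while loop with character-by-character string concatenation by word-based wrapping: split the (possibly truncated) string on single spaces once, then walk the parts keeping a running line length, emitting '\n' or ' ' per gap, joining the fragments at the end.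
import Mathlib
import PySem

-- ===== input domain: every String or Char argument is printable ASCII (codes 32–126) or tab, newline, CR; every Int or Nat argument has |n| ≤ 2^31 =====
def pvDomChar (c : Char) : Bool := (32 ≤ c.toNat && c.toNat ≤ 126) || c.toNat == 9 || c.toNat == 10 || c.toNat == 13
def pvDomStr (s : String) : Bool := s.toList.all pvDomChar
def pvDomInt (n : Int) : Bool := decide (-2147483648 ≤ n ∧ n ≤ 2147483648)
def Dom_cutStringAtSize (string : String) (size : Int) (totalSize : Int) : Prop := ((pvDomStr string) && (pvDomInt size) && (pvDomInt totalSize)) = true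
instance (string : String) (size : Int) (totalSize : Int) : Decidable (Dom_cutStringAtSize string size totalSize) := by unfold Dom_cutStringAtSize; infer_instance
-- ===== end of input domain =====

-- B replaces A's per-character while loop by split-on-space + gap-by-gap join (alternative decomposition; return value only, no side effects).

-- ===== PORT A =====
-- while i < len(string): if sub > size and string[i] == ' ': newString += '\n'; sub = 0  else: newString += string[i];  sub += 1
def cutA_loop (size : Int) : List Char → Int → List Char → List Char
  | [], _, acc => acc
  | ch :: rest, sub, acc =>
    if sub > size ∧ ch = ' ' then cutA_loop size rest (0 + 1) (acc ++ ['\n'])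
    else cutA_loop size rest (sub + 1) (acc ++ [ch])

def cutStringAtSize (string : String) (size : Int) (totalSize : Int) : String :=
  let cs := string.toList
  let cs := if (cs.length : Int) > totalSize then PySem.List.slice cs none (some totalSize) ++ "...".toList else cs
  String.ofList (cutA_loop size cs 0 [])

-- ===== PORT B =====
-- parts = string.split(' '), returned as (parts[0], parts[1:]) — Python's split on a single space
def splitSp : List Char → List Char × List (List Char)
  | [] => ([], [])
  | c :: cs =>
    let (p, ps) := splitSp cs
    if c = ' ' then ([], p :: ps) else (c :: p, ps)

-- for part in parts[1:]: handle the gap, append the part; out/c as foldl state (join = flat accumulation)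
def cutB_loop (size : Int) (parts : List (List Char)) (st : List Char × Int) : List Char × Int :=
  parts.foldl (fun st p =>
    if st.2 > size then (st.1 ++ '\n' :: p, 1 + (p.length : Int))
    else (st.1 ++ ' ' :: p, st.2 + 1 + (p.length : Int))) st

def cutStringAtSize_alt (string : String) (size : Int) (totalSize : Int) : String :=
  let cs := string.toList
  let cs := if (cs.length : Int) > totalSize then PySem.List.slice cs none (some totalSize) ++ "...".toList else cs
  let (p0, rest) := splitSp cs
  String.ofList (cutB_loop size rest (p0, (p0.length : Int))).1

-- ===== PRECONDITION & SPEC =====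
def Spec_cutStringAtSize (string : String) (size : Int) (totalSize : Int) (out : String) : Prop := out = cutStringAtSize_alt string size totalSize
instance (string : String) (size : Int) (totalSize : Int) (out : String) : Decidable (Spec_cutStringAtSize string size totalSize out) := by unfold Spec_cutStringAtSize; infer_instance

-- ===== CLAIM (what is proved, stated in full; the proofs are below) =====
def Claim_equal_cutStringAtSize : Prop := ∀ (string : String) (size : Int) (totalSize : Int), Dom_cutStringAtSize string size totalSize → Spec_cutStringAtSize string size totalSize (cutStringAtSize string size totalSize)

-- ===== LEMMAS AND PROOFS =====

lemma cutA_loop_acc (size : Int) (cs : List Char) : ∀ sub acc,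
    cutA_loop size cs sub acc = acc ++ cutA_loop size cs sub [] := by
  induction cs with
  | nil => intro sub acc; simp [cutA_loop]
  | cons ch rest ih =>
    intro sub acc
    simp only [cutA_loop]
    split_ifs with h
    · rw [ih (0 + 1) (acc ++ ['\n']), ih (0 + 1) ([] ++ ['\n'])]; simp
    · rw [ih (sub + 1) (acc ++ [ch]), ih (sub + 1) ([] ++ [ch])]; simp

-- the B loop with gap-recursion as result-prefix (no accumulator)
def cutB_gaps (size : Int) : List (List Char) → Int → List Char
  | [], _ => []
  | p :: ps, c =>
    if c > size then '\n' :: (p ++ cutB_gaps size ps (1 + (p.length : Int)))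
    else ' ' :: (p ++ cutB_gaps size ps (c + 1 + (p.length : Int)))

lemma cutB_loop_eq_gaps (size : Int) (parts : List (List Char)) : ∀ acc c,
    (cutB_loop size parts (acc, c)).1 = acc ++ cutB_gaps size parts c := by
  induction parts with
  | nil => intro acc c; simp [cutB_loop, cutB_gaps]
  | cons p ps ih =>
    intro acc c
    simp only [cutB_loop, List.foldl_cons] at *
    by_cases h : c > size
    · rw [if_pos h, ih (acc ++ '\n' :: p) (1 + (p.length : Int))]
      simp [cutB_gaps, h]
    · rw [if_neg h, ih (acc ++ ' ' :: p) (c + 1 + (p.length : Int))]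
      simp [cutB_gaps, h]

-- core: A's character loop equals first-part ++ gap loop over the split, for any running counter
lemma cutA_eq_split (size : Int) (cs : List Char) : ∀ sub,
    cutA_loop size cs sub [] =
      (splitSp cs).1 ++ cutB_gaps size (splitSp cs).2 (sub + ((splitSp cs).1.length : Int)) := by
  induction cs with
  | nil => intro sub; simp [cutA_loop, splitSp, cutB_gaps]
  | cons ch rest ih =>
    intro sub
    by_cases hsp : ch = ' '
    · subst hsp
      simp only [splitSp]
      by_cases h : sub > size
      · rw [show cutA_loop size (' ' :: rest) sub [] =
              cutA_loop size rest (0 + 1) ['\n'] by simp [cutA_loop, h]]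
        rw [cutA_loop_acc, ih (0 + 1)]
        simp [cutB_gaps, h]
      · rw [show cutA_loop size (' ' :: rest) sub [] =
              cutA_loop size rest (sub + 1) [' '] by simp [cutA_loop, h]]
        rw [cutA_loop_acc, ih (sub + 1)]
        simp [cutB_gaps, h]
    · rw [show cutA_loop size (ch :: rest) sub [] =
            cutA_loop size rest (sub + 1) [ch] by simp [cutA_loop, hsp]]
      rw [cutA_loop_acc, ih (sub + 1)]
      simp only [splitSp, if_neg hsp]
      cases hs : splitSp rest with
      | mk p ps =>
        simp
        congr 1
        ring

-- ===== VERDICT (by name: the statement is the Claim_ definition above) =====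
theorem cutStringAtSize_spec : Claim_equal_cutStringAtSize := by
  intro string size totalSize _
  unfold Spec_cutStringAtSize cutStringAtSize cutStringAtSize_alt
  simp only []
  set cs := (if ((string.toList.length : Int)) > totalSize then PySem.List.slice string.toList none (some totalSize) ++ "...".toList else string.toList) with hcs
  cases hs : splitSp cs with
  | mk p0 rest =>
    rw [cutA_eq_split size cs 0, hs, cutB_loop_eq_gaps]
    simp
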